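-- pv_equiv track=rewrite | github.com/AleksVasilievich/Immersion_in_Python | Task_3_DZ/Task3-2.py | find_backpack
-- ===== SOURCE A (Python) =====
-- def find_backpack(items, max_weight):
--     backpack = {}  # словарь с вещами в рюкзаке
--     result = []  # список всех возможных вариантов backpack
--
--     def backtrack(items, max_weight, current_weight, current_items):
--         if current_weight > max_weight:
--             return
--
--         if current_weight <= max_weight:
--             result.append(current_items.copy())
--
--         for item in items:
--             if item not in current_items:
--                 current_items[item] = items[item]
--                 current_weight += items[item]
--
--                 backtrack(items, max_weight, current_weight, current_items)
--
--                 current_items.pop(item)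
--                 current_weight -= items[item]
--
--     backtrack(items, max_weight, 0, backpack)
--
--     return result
-- ===== SOURCE B (Python) =====
-- def find_backpack(items, max_weight):
--     result = []
--     stack = [(0, {})]
--     while stack:
--         weight, chosen = stack.pop()
--         if weight > max_weight:
--             continue
--         result.append(chosen)
--         for key in reversed(items):
--             if key not in chosen:
--                 extended = dict(chosen)
--                 extended[key] = items[key]
--                 stack.append((weight + items[key], extended))
--     return result
-- ===== Notes on version B (the rewrite author's own statement) =====
-- stated objective: alternative
-- what changed: A's recursive backtracking with a shared mutated dict is replaced by an iterative DFS over an explicit stack of immutable (weight, chosen-dict) states, pushed in reverse item order so the pop sequence reproduces A's pre-order exactly.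
import Mathlib
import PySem

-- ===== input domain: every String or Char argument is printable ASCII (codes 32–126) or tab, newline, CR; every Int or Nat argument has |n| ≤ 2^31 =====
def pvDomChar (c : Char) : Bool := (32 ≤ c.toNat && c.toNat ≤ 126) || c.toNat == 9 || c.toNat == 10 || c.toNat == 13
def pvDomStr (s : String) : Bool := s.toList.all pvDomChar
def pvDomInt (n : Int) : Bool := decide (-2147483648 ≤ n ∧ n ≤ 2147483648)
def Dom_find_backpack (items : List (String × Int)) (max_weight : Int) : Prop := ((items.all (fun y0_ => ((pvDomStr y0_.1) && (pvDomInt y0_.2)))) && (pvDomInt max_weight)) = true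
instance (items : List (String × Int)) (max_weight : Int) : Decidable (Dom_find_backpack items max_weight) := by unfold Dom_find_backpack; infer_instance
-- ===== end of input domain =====

-- B replaces A's recursive backtracking with an iterative DFS over an explicit stack of
-- (weight, chosen-dict) states, pushing extensions in reverse item order so the pop order
-- reproduces A's pre-order exactly; an alternative decomposition, no speed claim.

-- ===== PORT A =====
-- A's inner recursive `backtrack`; the fuel argument only makes the recursion structural:
-- each call adds a distinct key of the item dict, so depth ≤ d.size and fuel d.size + 1
-- is never exhausted.
def backtrackA (d : PySem.Dict String Int) (mw : Int) (cw : Int)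
    (cur : PySem.Dict String Int) : Nat → List (List (String × Int))
  | 0 => []
  | fuel + 1 =>
    if cw > mw then []
    else cur.items :: d.items.foldl (fun acc kv =>
      if cur.contains kv.1 then acc
      else acc ++ backtrackA d mw (cw + kv.2) (cur.insert kv.1 kv.2) fuel) []

def find_backpack (items : List (String × Int)) (max_weight : Int) : List (List (String × Int)) :=
  let d := PySem.Dict.ofList items
  backtrackA d max_weight 0 PySem.Dict.empty (d.size + 1)

-- ===== PORT B =====
-- Number of items whose key is not yet in `cur` (termination measure ingredient).
def pvFree (d cur : PySem.Dict String Int) : Nat :=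
  (d.items.filter (fun kv => !(cur.contains kv.1))).length

-- B's inner `for key in reversed(items): … stack.append(…)` loop (stack head = top).
def pushB (d : PySem.Dict String Int) (w : Int) (cur : PySem.Dict String Int)
    (st0 : List (Int × PySem.Dict String Int)) : List (Int × PySem.Dict String Int) :=
  d.items.reverse.foldl
    (fun st kv => if !(cur.contains kv.1) then (w + kv.2, cur.insert kv.1 kv.2) :: st else st) st0

-- Pushing in reverse order prepends the kept extensions in forward order (used by the
-- termination proof of runB, hence stated here).
theorem pv_rev_push {α β : Type} (l : List α) (p : α → Bool) (g : α → β) (rest : List β) :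
    l.reverse.foldl (fun st x => if p x then g x :: st else st) rest
      = (l.filter p).map g ++ rest := by
  induction l with
  | nil => rfl
  | cons a t ih =>
      simp [List.foldl_append, ih]
      by_cases h : p a <;> simp [h]

theorem pushB_eq (d : PySem.Dict String Int) (w : Int) (cur : PySem.Dict String Int)
    (st0 : List (Int × PySem.Dict String Int)) :
    pushB d w cur st0 = (d.items.filter (fun kv => !(cur.contains kv.1))).map
      (fun kv => (w + kv.2, cur.insert kv.1 kv.2)) ++ st0 :=
  pv_rev_push _ _ _ _

-- Inserting a not-yet-present item key strictly shrinks the set of free items (termination).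
theorem pvFree_insert_lt (d cur : PySem.Dict String Int) {kv : String × Int}
    (h : kv ∈ d.items.filter (fun kv => !(cur.contains kv.1))) :
    pvFree d (cur.insert kv.1 kv.2) < pvFree d cur := by
  unfold pvFree
  have hc : ∀ x : String × Int,
      (!((cur.insert kv.1 kv.2).contains x.1)) = ((!(x.1 == kv.1)) && !(cur.contains x.1)) := by
    intro x
    rw [PySem.Dict.contains_insert]
    cases hx : cur.contains x.1 <;> cases hk : (x.1 == kv.1) <;> simp
  calc (d.items.filter (fun x => !((cur.insert kv.1 kv.2).contains x.1))).length
      = ((d.items.filter (fun x => !(cur.contains x.1))).filter (fun x => !(x.1 == kv.1))).length := by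
        rw [List.filter_filter]
        exact congrArg _ (List.filter_congr (fun x _ => hc x))
    _ < (d.items.filter (fun x => !(cur.contains x.1))).length := by
        rw [List.length_filter_lt_length_iff_exists]
        exact ⟨kv, h, by simp⟩

-- B's `while stack:` loop; terminates because each popped state is replaced by states with
-- strictly fewer free items.
def runB (d : PySem.Dict String Int) (mw : Int) :
    List (Int × PySem.Dict String Int) → List (List (String × Int))
  | [] => []
  | (w, cur) :: rest =>
    if w > mw then runB d mw rest
    else cur.items :: runB d mw (pushB d w cur rest)
  termination_by stack => (stack.map (fun s => (d.size + 1) ^ pvFree d s.2)).sum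
  decreasing_by
  · simp
  · rw [pushB_eq]
    simp only [List.map_append, List.sum_append, List.map_cons, List.sum_cons, List.map_map]
    set F := d.items.filter (fun kv => !(cur.contains kv.1)) with hF
    have hlen : F.length = pvFree d cur := rfl
    have hle : pvFree d cur ≤ d.size := by
      have := List.length_filter_le (fun kv : String × Int => !(cur.contains kv.1)) d.items
      simpa [PySem.Dict.size, ← hlen] using this
    have hb : (F.map ((fun s : Int × PySem.Dict String Int => (d.size + 1) ^ pvFree d s.2) ∘
        (fun kv => (w + kv.2, cur.insert kv.1 kv.2)))).sum
        ≤ F.length * (d.size + 1) ^ (pvFree d cur - 1) := by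
      calc _ ≤ (F.map (fun _ => (d.size + 1) ^ (pvFree d cur - 1))).sum := by
              apply List.sum_le_sum
              intro kv hkv
              show (d.size + 1) ^ pvFree d (cur.insert kv.1 kv.2) ≤ (d.size + 1) ^ (pvFree d cur - 1)
              apply Nat.pow_le_pow_right (by omega)
              have := pvFree_insert_lt d cur (hF ▸ hkv)
              omega
        _ = F.length * (d.size + 1) ^ (pvFree d cur - 1) := by
              simp [List.map_const', mul_comm]
    have hkey : F.length * (d.size + 1) ^ (pvFree d cur - 1) < (d.size + 1) ^ pvFree d cur := by
      rcases Nat.eq_zero_or_pos (pvFree d cur) with h0 | hpos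
      · simp [hlen, h0]
      · have hsp : (d.size + 1) ^ pvFree d cur
            = (d.size + 1) ^ (pvFree d cur - 1) * (d.size + 1) := by
          rw [← pow_succ]; congr 1; omega
        have hpos2 : 0 < (d.size + 1) ^ (pvFree d cur - 1) := Nat.pow_pos (by omega)
        rw [hsp, hlen, mul_comm (pvFree d cur)]
        exact (Nat.mul_lt_mul_left hpos2).mpr (by omega)
    omega

def find_backpack_alt (items : List (String × Int)) (max_weight : Int) : List (List (String × Int)) :=
  let d := PySem.Dict.ofList items
  runB d max_weight [(0, PySem.Dict.empty)]

-- ===== PRECONDITION & SPEC =====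
def Spec_find_backpack (items : List (String × Int)) (max_weight : Int) (out : List (List (String × Int))) : Prop := out = find_backpack_alt items max_weight
instance (items : List (String × Int)) (max_weight : Int) (out : List (List (String × Int))) : Decidable (Spec_find_backpack items max_weight out) := by unfold Spec_find_backpack; infer_instance

-- ===== CLAIM (what is proved, stated in full; the proofs are below) =====
def Claim_equal_find_backpack : Prop := ∀ (items : List (String × Int)) (max_weight : Int), Dom_find_backpack items max_weight → Spec_find_backpack items max_weight (find_backpack items max_weight)

-- ===== LEMMAS AND PROOFS =====

-- With distinct item keys the insertion removes EXACTLY one free item.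
theorem pvFree_insert_eq (d cur : PySem.Dict String Int) (hnd : d.keys.Nodup) {kv : String × Int}
    (h : kv ∈ d.items.filter (fun kv => !(cur.contains kv.1))) :
    pvFree d (cur.insert kv.1 kv.2) + 1 = pvFree d cur := by
  unfold pvFree
  have hc : ∀ x : String × Int,
      (!((cur.insert kv.1 kv.2).contains x.1)) = ((!(x.1 == kv.1)) && !(cur.contains x.1)) := by
    intro x
    rw [PySem.Dict.contains_insert]
    cases hx : cur.contains x.1 <;> cases hk : (x.1 == kv.1) <;> simp
  set F := d.items.filter (fun x => !(cur.contains x.1)) with hF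
  have h1 : (d.items.filter (fun x => !((cur.insert kv.1 kv.2).contains x.1))).length
      = (F.filter (fun x => !(x.1 == kv.1))).length := by
    rw [List.filter_filter]
    exact congrArg _ (List.filter_congr (fun x _ => hc x))
  have hnodF : (F.map Prod.fst).Nodup := by
    have hsub : F.Sublist d.items := List.filter_sublist
    have : (F.map Prod.fst).Sublist (d.items.map Prod.fst) := hsub.map _
    have hk : (d.items.map Prod.fst).Nodup := by simpa [PySem.Dict.keys] using hnd
    exact hk.sublist this
  have hmem : kv.1 ∈ F.map Prod.fst := List.mem_map_of_mem h
  have hcount : (F.filter (fun x => (x.1 == kv.1))).length = 1 := by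
    have : F.countP (fun x => x.1 == kv.1) = (F.map Prod.fst).count kv.1 := by
      simp [List.count, List.countP_map]; rfl
    rw [← List.countP_eq_length_filter, this, List.count_eq_one_of_mem hnodF hmem]
  have hsplit : (F.filter (fun x => !(x.1 == kv.1))).length
      + (F.filter (fun x => (x.1 == kv.1))).length = F.length := by
    have := List.length_eq_length_filter_add (l := F) (fun x : String × Int => !(x.1 == kv.1))
    simpa using this.symm
  omega

theorem pv_flatMap_guard {α β : Type} (l : List α) (c : α → Bool) (h : α → List β) :
    l.flatMap (fun x => if c x then [] else h x) = (l.filter (fun x => !(c x))).flatMap h := by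
  induction l with
  | nil => rfl
  | cons a t ih =>
      by_cases hc : c a <;> simp [hc, ih]

-- The stack invariant: running B's loop emits, state by state, exactly A's recursion on
-- that state (with the exact fuel pvFree + 1).
theorem runB_eq (d : PySem.Dict String Int) (hnd : d.keys.Nodup) (mw : Int)
    (stack : List (Int × PySem.Dict String Int)) :
    runB d mw stack
      = (stack.map (fun s => backtrackA d mw s.1 s.2 (pvFree d s.2 + 1))).flatten := by
  fun_induction runB d mw stack with
  | case1 => rfl
  | case2 w cur rest hw ih =>
      simp [backtrackA, hw, ih]
  | case3 w cur rest hw ih =>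
      rw [ih, pushB_eq]
      set F := d.items.filter (fun kv => !(cur.contains kv.1)) with hF
      simp only [List.map_append, List.flatten_append, List.map_cons, List.flatten_cons]
      have hunf : backtrackA d mw w cur (pvFree d cur + 1)
          = cur.items :: d.items.foldl (fun acc kv =>
              if cur.contains kv.1 then acc
              else acc ++ backtrackA d mw (w + kv.2) (cur.insert kv.1 kv.2) (pvFree d cur)) [] := by
        simp [backtrackA, hw]
      rw [hunf]
      congr 1
      rw [PySem.List.foldl_congr_mem d.items _
            (fun acc kv => acc ++ (if cur.contains kv.1 then []
              else backtrackA d mw (w + kv.2) (cur.insert kv.1 kv.2) (pvFree d cur))) []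
            (by intro acc kv _; by_cases h : cur.contains kv.1 <;> simp [h]),
        PySem.List.foldl_append_eq_flatMap, pv_flatMap_guard, List.nil_append, ← hF]
      simp only [List.map_map]
      rw [← List.flatMap_def]
      congr 1
      apply List.flatMap_congr
      intro kv hkv
      show backtrackA d mw (w + kv.2) (cur.insert kv.1 kv.2) (pvFree d (cur.insert kv.1 kv.2) + 1)
          = backtrackA d mw (w + kv.2) (cur.insert kv.1 kv.2) (pvFree d cur)
      rw [pvFree_insert_eq d cur hnd (hF ▸ hkv)]

theorem pv_main (items : List (String × Int)) (mw : Int) :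
    find_backpack items mw = find_backpack_alt items mw := by
  unfold find_backpack find_backpack_alt
  rw [runB_eq (PySem.Dict.ofList items) (PySem.Dict.nodup_keys_ofList items) mw]
  simp only [List.map_cons, List.map_nil, List.flatten_cons, List.flatten_nil, List.append_nil]
  have h : pvFree (PySem.Dict.ofList items) PySem.Dict.empty = (PySem.Dict.ofList items).size := by
    simp [pvFree, PySem.Dict.contains_empty, PySem.Dict.size]
  rw [h]

-- ===== VERDICT (by name: the statement is the Claim_ definition above) =====
theorem find_backpack_spec : Claim_equal_find_backpack := by
  intro items max_weight _
  unfold Spec_find_backpack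
  exact pv_main items max_weight
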